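-- pv_equiv track=rewrite | github.com/Nathalie-mac/zip | Защита информации/костыли/Lab3/Main.py | feistel_network
-- ===== SOURCE A (Python) =====
-- def xor(a, b):
--     # Операция XOR для двух строк
--     return ''.join(chr(ord(x) ^ ord(y)) for x, y in zip(a, b))
--
-- def feistel_round(left, right, key):
--     # Один раунд сети Фейштеля
--     new_left = right
--     new_right = xor(left, xor(right, key))
--     return new_left, new_right
--
-- def feistel_network(block, key, rounds, encrypt=True):
--     # Сеть Фейштеля для шифрования/дешифрования блока
--     block_size = len(block)
--     left, right = block[:block_size // 2], block[block_size // 2:]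
--
--     for i in range(rounds):
--         if encrypt:
--             left, right = feistel_round(left, right, key)
--         else:
--             right, left = feistel_round(right, left, key)
--
--     return left + right
-- ===== SOURCE B (Python) =====
-- def feistel_network(block, key, rounds, encrypt=True):
--     # Period reduction: after 2 rounds both halves have the same (stable) length
--     # <= len(key), and the GF(2)-linear round map has period 3 on such states,
--     # so only min(rounds,2) + (rounds-2) % 3 rounds are ever computed.
--     n = len(block)
--     left, right = block[:n // 2], block[n // 2:]
--
--     def xor2(a, b):
--         return ''.join(chr(ord(x) ^ ord(y)) for x, y in zip(a, b))
--
--     def step(l, r):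
--         if encrypt:
--             return r, xor2(l, xor2(r, key))
--         else:
--             return xor2(r, xor2(l, key)), l
--
--     total = max(rounds, 0)
--     pre = min(total, 2)
--     for _ in range(pre):
--         left, right = step(left, right)
--     rem = (total - 2) % 3 if total > 2 else 0
--     for _ in range(rem):
--         left, right = step(left, right)
--     return left + right
-- ===== Notes on version B (the rewrite author's own statement) =====
-- stated objective: faster
-- what changed: B exploits that the XOR round map has period 3 once the half-lengths stabilise (after at most 2 rounds), so it performs only min(rounds,2) + (rounds-2) % 3 rounds instead of A's full loop over all rounds.
import Mathlib
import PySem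

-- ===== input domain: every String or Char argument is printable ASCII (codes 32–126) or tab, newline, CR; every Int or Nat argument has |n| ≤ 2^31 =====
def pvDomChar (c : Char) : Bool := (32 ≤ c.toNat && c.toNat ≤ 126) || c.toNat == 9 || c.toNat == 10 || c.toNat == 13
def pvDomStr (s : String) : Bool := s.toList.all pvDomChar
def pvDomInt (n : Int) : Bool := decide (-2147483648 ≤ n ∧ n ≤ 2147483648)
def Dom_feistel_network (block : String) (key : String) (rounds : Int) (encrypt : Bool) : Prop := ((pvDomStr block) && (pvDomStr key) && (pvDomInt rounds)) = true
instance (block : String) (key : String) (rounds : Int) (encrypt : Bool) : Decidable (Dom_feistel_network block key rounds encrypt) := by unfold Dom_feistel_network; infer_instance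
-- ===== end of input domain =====

-- B replaces A's O(rounds·block) loop by min(rounds,2) + (rounds-2) % 3 rounds,
-- using that the XOR round map has period 3 once the half-lengths stabilise (faster: asymptotic in rounds).

-- ===== PORT A =====
-- ''.join(chr(ord(x) ^ ord(y)) for x, y in zip(a, b)); exact on the ASCII domain
-- (all codes stay < 128, where chr/ord agree with Char.ofNat/Char.toNat)
def pyXorA (a b : List Char) : List Char :=
  List.zipWith (fun x y => Char.ofNat (x.toNat ^^^ y.toNat)) a b

def feistelRoundA (left right key : List Char) : List Char × List Char :=
  (right, pyXorA left (pyXorA right key))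

def feistel_network (block : String) (key : String) (rounds : Int) (encrypt : Bool) : String :=
  let cs := block.toList
  -- block[:n//2], block[n//2:] with 0 ≤ n//2 ≤ n are exactly take/drop
  let half := cs.length / 2
  let s := (PySem.List.pyRange 0 rounds 1).foldl (fun s _ =>
      if encrypt then feistelRoundA s.1 s.2 key.toList
      else ((feistelRoundA s.2 s.1 key.toList).2, (feistelRoundA s.2 s.1 key.toList).1))
    (cs.take half, cs.drop half)
  String.mk (s.1 ++ s.2)

-- ===== PORT B =====
-- ''.join(chr(ord(x) ^ ord(y)) for x, y in zip(a, b)); exact on the ASCII domain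
def pyXorB (a b : List Char) : List Char :=
  List.zipWith (fun x y => Char.ofNat (x.toNat ^^^ y.toNat)) a b

def stepB (key : List Char) (encrypt : Bool) (s : List Char × List Char) : List Char × List Char :=
  if encrypt then (s.2, pyXorB s.1 (pyXorB s.2 key))
  else (pyXorB s.2 (pyXorB s.1 key), s.1)

def feistel_network_alt (block : String) (key : String) (rounds : Int) (encrypt : Bool) : String :=
  let cs := block.toList
  let half := cs.length / 2
  let total := (max rounds 0).toNat
  let pre := min total 2
  let rem := if total ≤ 2 then 0 else (total - 2) % 3
  let s := (stepB key.toList encrypt)^[rem] ((stepB key.toList encrypt)^[pre] (cs.take half, cs.drop half))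
  String.mk (s.1 ++ s.2)

-- ===== PRECONDITION & SPEC =====
def Spec_feistel_network (block : String) (key : String) (rounds : Int) (encrypt : Bool) (out : String) : Prop := out = feistel_network_alt block key rounds encrypt
instance (block : String) (key : String) (rounds : Int) (encrypt : Bool) (out : String) : Decidable (Spec_feistel_network block key rounds encrypt out) := by unfold Spec_feistel_network; infer_instance

-- ===== CLAIM (what is proved, stated in full; the proofs are below) =====
def Claim_equal_feistel_network : Prop := ∀ (block : String) (key : String) (rounds : Int) (encrypt : Bool), Dom_feistel_network block key rounds encrypt → Spec_feistel_network block key rounds encrypt (feistel_network block key rounds encrypt)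

-- ===== LEMMAS AND PROOFS =====

def BddL (l : List Char) : Prop := ∀ c ∈ l, c.toNat < 128

def InvP (k : List Char) (s : List Char × List Char) : Prop :=
  s.1.length = s.2.length ∧ s.1.length ≤ k.length ∧ BddL s.1 ∧ BddL s.2

theorem char_rt {n : Nat} (h : n < 128) : (Char.ofNat n).toNat = n := by
  rw [Char.toNat_ofNat, if_pos (Or.inl (by omega : n < 0xd800))]

theorem xor_lt {x y : Nat} (hx : x < 128) (hy : y < 128) : x ^^^ y < 128 := by
  have := Nat.xor_lt_two_pow (n := 7) (x := x) (y := y); omega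

theorem bdd_xor {a b : List Char} (ha : BddL a) (hb : BddL b) : BddL (pyXorB a b) := by
  induction a generalizing b with
  | nil => intro c hc; simp [pyXorB] at hc
  | cons x a ih =>
    cases b with
    | nil => intro c hc; simp [pyXorB] at hc
    | cons y b =>
      intro c hc
      have hx : x.toNat < 128 := ha x (by simp)
      have hy : y.toNat < 128 := hb y (by simp)
      have ta : BddL a := fun d hd => ha d (List.mem_cons_of_mem _ hd)
      have tb : BddL b := fun d hd => hb d (List.mem_cons_of_mem _ hd)
      simp only [pyXorB, List.zipWith_cons_cons, List.mem_cons] at hc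
      rcases hc with h | h
      · subst h; rw [char_rt (xor_lt hx hy)]; exact xor_lt hx hy
      · exact ih ta tb c h

theorem natId1 (x y z : Nat) : y ^^^ ((x ^^^ (y ^^^ z)) ^^^ z) = x := by
  simp [Nat.xor_comm, Nat.xor_left_comm]

theorem natId2 (x y z : Nat) : (x ^^^ (y ^^^ z)) ^^^ (x ^^^ z) = y := by
  simp [Nat.xor_comm, Nat.xor_left_comm]

theorem tripleA (a b k : List Char) (hab : a.length = b.length) (hk : a.length ≤ k.length)
    (Ba : BddL a) (Bb : BddL b) (Bk : BddL k) :
    pyXorB b (pyXorB (pyXorB a (pyXorB b k)) k) = a := by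
  induction a generalizing b k with
  | nil =>
    have : b = [] := List.eq_nil_of_length_eq_zero (by simpa using hab.symm)
    simp [this, pyXorB]
  | cons x a ih =>
    cases b with
    | nil => simp at hab
    | cons y b =>
      cases k with
      | nil => simp at hk
      | cons z k =>
        have hx : x.toNat < 128 := Ba x (by simp)
        have hy : y.toNat < 128 := Bb y (by simp)
        have hz : z.toNat < 128 := Bk z (by simp)
        simp only [pyXorB, List.zipWith_cons_cons, List.cons.injEq]
        refine ⟨?_, ?_⟩
        · rw [char_rt (xor_lt hy hz), char_rt (xor_lt hx (xor_lt hy hz)),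
            char_rt (xor_lt (xor_lt hx (xor_lt hy hz)) hz),
            natId1 x.toNat y.toNat z.toNat, Char.ofNat_toNat]
        · exact ih b k (by simpa using hab) (by simpa using hk)
            (fun c hc => Ba c (by simp [hc])) (fun c hc => Bb c (by simp [hc]))
            (fun c hc => Bk c (by simp [hc]))

theorem tripleB (a b k : List Char) (hab : a.length = b.length) (hk : a.length ≤ k.length)
    (Ba : BddL a) (Bb : BddL b) (Bk : BddL k) :
    pyXorB (pyXorB a (pyXorB b k)) (pyXorB a k) = b := by
  induction a generalizing b k with
  | nil =>
    have : b = [] := List.eq_nil_of_length_eq_zero (by simpa using hab.symm)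
    simp [this, pyXorB]
  | cons x a ih =>
    cases b with
    | nil => simp at hab
    | cons y b =>
      cases k with
      | nil => simp at hk
      | cons z k =>
        have hx : x.toNat < 128 := Ba x (by simp)
        have hy : y.toNat < 128 := Bb y (by simp)
        have hz : z.toNat < 128 := Bk z (by simp)
        simp only [pyXorB, List.zipWith_cons_cons, List.cons.injEq]
        refine ⟨?_, ?_⟩
        · rw [char_rt (xor_lt hy hz), char_rt (xor_lt hx (xor_lt hy hz)), char_rt (xor_lt hx hz)]
          rw [natId2 x.toNat y.toNat z.toNat, Char.ofNat_toNat]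
        · exact ih b k (by simpa using hab) (by simpa using hk)
            (fun c hc => Ba c (by simp [hc])) (fun c hc => Bb c (by simp [hc]))
            (fun c hc => Bk c (by simp [hc]))

theorem stepE3 (k : List Char) (Bk : BddL k) (s : List Char × List Char) (h : InvP k s) :
    stepB k true (stepB k true (stepB k true s)) = s := by
  obtain ⟨a, b⟩ := s
  obtain ⟨h1, h2, Ba, Bb⟩ := h
  simp only at h1 h2 Ba Bb
  have e1 : pyXorB b (pyXorB (pyXorB a (pyXorB b k)) k) = a :=
    tripleA a b k h1 h2 Ba Bb Bk
  have e2 : pyXorB (pyXorB a (pyXorB b k)) (pyXorB a k) = b :=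
    tripleB a b k h1 h2 Ba Bb Bk
  simp only [stepB]
  simp [e1, e2]

theorem step3 (k : List Char) (e : Bool) (Bk : BddL k) (s : List Char × List Char) (h : InvP k s) :
    stepB k e (stepB k e (stepB k e s)) = s := by
  cases e with
  | true => exact stepE3 k Bk s h
  | false =>
    obtain ⟨a, b⟩ := s
    obtain ⟨h1, h2, Ba, Bb⟩ := h
    simp only at h1 h2 Ba Bb
    have e1 : pyXorB a (pyXorB (pyXorB b (pyXorB a k)) k) = b :=
      tripleA b a k h1.symm (h1 ▸ h2) Bb Ba Bk
    have e2 : pyXorB (pyXorB b (pyXorB a k)) (pyXorB b k) = a :=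
      tripleB b a k h1.symm (h1 ▸ h2) Bb Ba Bk
    simp only [stepB, if_neg Bool.false_ne_true]
    simp [e1, e2]

theorem iter3 {α : Type} (f : α → α) (s : α) (h3 : f (f (f s)) = s) (q r : Nat) :
    f^[3 * q + r] s = f^[r] s := by
  induction q with
  | zero => simp
  | succ q ih =>
    have : 3 * (q + 1) + r = (3 * q + r) + 3 := by omega
    rw [this, Function.iterate_add_apply]
    have h3' : f^[3] s = s := by
      simpa [Function.iterate_succ_apply'] using h3
    rw [h3', ih]

theorem inv_after2 (k : List Char) (e : Bool) (Bk : BddL k) (s : List Char × List Char)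
    (B1 : BddL s.1) (B2 : BddL s.2) : InvP k (stepB k e (stepB k e s)) := by
  obtain ⟨a, b⟩ := s
  simp only at B1 B2
  cases e with
  | true =>
    refine ⟨?_, ?_, ?_, ?_⟩
    · simp [stepB, pyXorB, List.length_zipWith]
    · simp [stepB, pyXorB, List.length_zipWith]
    · simp only [stepB, if_pos rfl]
      exact bdd_xor B1 (bdd_xor B2 Bk)
    · simp only [stepB, if_pos rfl]
      exact bdd_xor B2 (bdd_xor (bdd_xor B1 (bdd_xor B2 Bk)) Bk)
  | false =>
    refine ⟨?_, ?_, ?_, ?_⟩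
    · simp [stepB, pyXorB, List.length_zipWith]
    · simp [stepB, pyXorB, List.length_zipWith]
    · simp only [stepB, if_neg Bool.false_ne_true]
      exact bdd_xor B1 (bdd_xor (bdd_xor B2 (bdd_xor B1 Bk)) Bk)
    · simp only [stepB, if_neg Bool.false_ne_true]
      exact bdd_xor B2 (bdd_xor B1 Bk)

theorem foldl_const {α β : Type} (f : α → α) (l : List β) (s : α) :
    l.foldl (fun s _ => f s) s = f^[l.length] s := by
  induction l generalizing s with
  | nil => simp
  | cons x l ih => simp [Function.iterate_succ_apply, ih]

theorem bodyA_eq (k : List Char) (encrypt : Bool) :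
    (fun (s : List Char × List Char) (_ : Int) =>
      if encrypt then feistelRoundA s.1 s.2 k
      else ((feistelRoundA s.2 s.1 k).2, (feistelRoundA s.2 s.1 k).1))
      = (fun (s : List Char × List Char) (_ : Int) => stepB k encrypt s) := by
  funext s i
  cases encrypt <;> simp [feistelRoundA, stepB, pyXorA, pyXorB]

theorem dom_bdd {s : String} (h : pvDomStr s = true) : BddL s.toList := by
  intro c hc
  have := List.all_eq_true.mp h c hc
  simp [pvDomChar] at this
  omega

theorem bdd_sub {l l' : List Char} (h : BddL l) (hsub : ∀ c ∈ l', c ∈ l) : BddL l' :=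
  fun c hc => h c (hsub c hc)

theorem iterate_eq_main (f : (List Char × List Char) → (List Char × List Char))
    (init : List Char × List Char) (t : Nat)
    (h3 : f (f (f (f (f init)))) = f (f init)) :
    f^[t] init = f^[if t ≤ 2 then 0 else (t - 2) % 3] (f^[min t 2] init) := by
  by_cases ht : t ≤ 2
  · simp [ht]
  · have h2 : min t 2 = 2 := by omega
    rw [if_neg ht, h2]
    have hsplit : t = (t - 2) + 2 := by omega
    rw [hsplit, Function.iterate_add_apply]
    have hmod : t - 2 = 3 * ((t - 2) / 3) + (t - 2) % 3 := by omega
    rw [hmod, iter3 f (f^[2] init) (by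
      show f (f (f (f^[2] init))) = f^[2] init
      simpa [Function.iterate_succ_apply'] using h3)]
    congr 1
    omega

-- ===== VERDICT (by name: the statement is the Claim_ definition above) =====
theorem feistel_network_spec : Claim_equal_feistel_network := by
  intro block key rounds encrypt hdom
  unfold Spec_feistel_network
  have hdom' : pvDomStr block = true ∧ pvDomStr key = true := by
    unfold Dom_feistel_network at hdom
    simp [Bool.and_eq_true] at hdom
    exact ⟨hdom.1.1, hdom.1.2⟩
  have Bk : BddL key.toList := dom_bdd hdom'.2
  have Bb : BddL block.toList := dom_bdd hdom'.1
  unfold feistel_network feistel_network_alt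
  simp only []
  set cs := block.toList with hcs
  set half := cs.length / 2 with hhalf
  set f := stepB key.toList encrypt with hf
  set init : List Char × List Char := (cs.take half, cs.drop half) with hinit
  rw [bodyA_eq key.toList encrypt, foldl_const (stepB key.toList encrypt), PySem.List.length_pyRange_one]
  have htot : ((rounds : Int) - 0).toNat = (max rounds 0).toNat := by omega
  rw [htot]
  set t := (max rounds 0).toNat with ht
  have B1 : BddL init.1 := bdd_sub Bb (fun c hc => List.mem_of_mem_take hc)
  have B2 : BddL init.2 := bdd_sub Bb (fun c hc => List.mem_of_mem_drop hc)
  have hinv : InvP key.toList (f (f init)) := inv_after2 key.toList encrypt Bk init B1 B2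
  have h3 : f (f (f (f (f init)))) = f (f init) :=
    step3 key.toList encrypt Bk (f (f init)) hinv
  rw [iterate_eq_main f init t h3]
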